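-- pv_equiv track=rewrite | github.com/MadsWorsoe/Cloud9-x-JetBrains-Hackathon | draft/machine_learning/analyzer_v2.py | find_role_assignment
-- ===== SOURCE A (Python) =====
-- ROLES = ["top", "jungle", "mid", "bot", "support"]
--
-- def find_role_assignment(champions_roles):
--     """
--     champions_roles: list of lists of roles (e.g. [["top", "jungle"], ["mid"]])
--     """
--     n = len(champions_roles)
--     if n == 0:
--         return []
--
--     assigned = [None] * n
--     used_roles = {role: False for role in ROLES}
--
--     def backtrack(idx):
--         if idx == n:
--             return True
--         for role in champions_roles[idx]:
--             if role in used_roles and not used_roles[role]: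
--                 used_roles[role] = True
--                 assigned[idx] = role
--                 if backtrack(idx + 1):
--                     return True
--                 used_roles[role] = False
--                 assigned[idx] = None
--         return False
--
--     if backtrack(0):
--         return assigned
--     return None
-- ===== SOURCE B (Python) =====
-- ROLES = ["top", "jungle", "mid", "bot", "support"]
--
-- def find_role_assignment(champions_roles):
--     """
--     champions_roles: list of lists of roles (e.g. [["top", "jungle"], ["mid"]])
--     """
--     n = len(champions_roles)
--     if n == 0:
--         return []
--     role_set = set(ROLES)
--
--     def feasible(idx, used):
--         # can champions idx..n-1 still be given distinct valid roles on top of `used`?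
--         if idx == n:
--             return True
--         for role in champions_roles[idx]:
--             if role in role_set and role not in used and feasible(idx + 1, used | {role}):
--                 return True
--         return False
--
--     used = set()
--     assigned = []
--     for i in range(n):
--         choice = None
--         for role in champions_roles[i]:
--             if role in role_set and role not in used and feasible(i + 1, used | {role}):
--                 choice = role
--                 break
--         if choice is None:
--             return None
--         used.add(choice)
--         assigned.append(choice)
--     return assigned
-- ===== Notes on version B (the rewrite author's own statement) =====
-- stated objective: alternative
-- what changed: A assigns roles by depth-first backtracking that builds and un-builds a shared assignment; B makes a single greedy pass over the champions, committing for each the first valid unused role under which the remaining champions are still assignable (a separate feasibility test), so committed choices are never revisited.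
import Mathlib
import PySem

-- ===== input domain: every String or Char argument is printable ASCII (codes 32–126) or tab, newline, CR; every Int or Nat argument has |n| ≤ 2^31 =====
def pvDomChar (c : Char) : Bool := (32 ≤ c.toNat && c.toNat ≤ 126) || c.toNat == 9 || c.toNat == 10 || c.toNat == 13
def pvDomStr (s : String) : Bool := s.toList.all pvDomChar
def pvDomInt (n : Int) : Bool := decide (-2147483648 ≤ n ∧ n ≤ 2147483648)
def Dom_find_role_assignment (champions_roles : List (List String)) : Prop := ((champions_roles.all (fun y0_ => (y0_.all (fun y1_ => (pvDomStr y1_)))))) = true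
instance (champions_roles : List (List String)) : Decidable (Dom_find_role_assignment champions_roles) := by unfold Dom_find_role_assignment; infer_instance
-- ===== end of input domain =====

-- B replaces A's depth-first backtracking (which builds and un-builds the assignment) by a
-- greedy pass committing, per champion, the first role that keeps the rest assignable (objective: alternative).

def pvROLES : List String := ["top", "jungle", "mid", "bot", "support"]

-- ===== PORT A =====
-- `backtrack` mutates `used_roles` (dict role → bool) and `assigned`; the port threads that
-- state explicitly. `rem` is fuel (= n - idx whenever called); the fuel-0 branch is unreachable.
-- the inner 'for role in champions_roles[idx]' loop; `f` is the recursive call backtrack(idx+1)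
def pvTryA (f : PySem.Dict String Bool → List (Option String) →
      Bool × PySem.Dict String Bool × List (Option String)) (idx : Nat)
    (roles : List String) (used : PySem.Dict String Bool) (assigned : List (Option String)) :
    Bool × PySem.Dict String Bool × List (Option String) :=
  match roles with
  | [] => (false, used, assigned)
  | r :: rest =>
    -- 'role in used_roles and not used_roles[role]'
    if used.contains r && !(used.getD r false) then
      let res := f (used.insert r true) (assigned.set idx (some r))
      if res.1 then res
      else pvTryA f idx rest (res.2.1.insert r false) (res.2.2.set idx none)
    else pvTryA f idx rest used assigned

def pvBacktrackA (champs : List (List String)) (n : Nat) (rem : Nat) (idx : Nat)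
    (used : PySem.Dict String Bool) (assigned : List (Option String)) :
    Bool × PySem.Dict String Bool × List (Option String) :=
  if idx = n then (true, used, assigned)
  else
    match rem with
    | 0 => (false, used, assigned)   -- fuel guard only; never reached when rem = n - idx
    | rem' + 1 =>
      pvTryA (fun u a => pvBacktrackA champs n rem' (idx + 1) u a) idx
        (champs.getD idx []) used assigned

def find_role_assignment (champions_roles : List (List String)) : Option (List String) :=
  let n := champions_roles.length
  if n = 0 then some []
  else
    let assigned : List (Option String) := List.replicate n none
    let used_roles : PySem.Dict String Bool := pvROLES.foldl (fun d r => d.insert r false) PySem.Dict.empty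
    let res := pvBacktrackA champions_roles n n 0 used_roles assigned
    -- on success every slot of the assigned list is `some _`, so extracting with getD "" is exact
    if res.1 then some (res.2.2.map (fun o => o.getD "")) else none

-- ===== PORT B =====
def pvRoleSetB : PySem.Set String := PySem.Set.ofList pvROLES

-- `feasible(idx, used)`: can champions idx..n-1 still get distinct valid roles?  (fuel `rem` = n - idx)
-- the 'for role in champions_roles[idx]' loop of feasible; `f` is the recursive call feasible(idx+1, ·)
def pvFeasLoopB (f : PySem.Set String → Bool) (roles : List String) (used : PySem.Set String) : Bool :=
  match roles with
  | [] => false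
  | r :: rest =>
    if pvRoleSetB.contains r && !(used.contains r) && f (PySem.Set.add used r) then true
    else pvFeasLoopB f rest used

def pvFeasibleB (champs : List (List String)) (n : Nat) (rem : Nat) (idx : Nat)
    (used : PySem.Set String) : Bool :=
  if idx = n then true
  else
    match rem with
    | 0 => false   -- fuel guard only; never reached when rem = n - idx
    | rem' + 1 =>
      pvFeasLoopB (fun u => pvFeasibleB champs n rem' (idx + 1) u) (champs.getD idx []) used

-- the inner 'for role …: if …: choice = role; break'
def pvPickB (champs : List (List String)) (n : Nat) (idx : Nat) (roles : List String)
    (used : PySem.Set String) : Option String :=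
  match roles with
  | [] => none
  | r :: rest =>
    if pvRoleSetB.contains r && !(used.contains r)
        && pvFeasibleB champs n (n - (idx + 1)) (idx + 1) (PySem.Set.add used r) then some r
    else pvPickB champs n idx rest used

-- the outer 'for i in range(n)' (fuel k = n - idx)
def pvGreedyB (champs : List (List String)) (n : Nat) (k : Nat) (idx : Nat)
    (used : PySem.Set String) (acc : List String) : Option (List String) :=
  match k with
  | 0 => some acc
  | k' + 1 =>
    match pvPickB champs n idx (champs.getD idx []) used with
    | none => none
    | some r => pvGreedyB champs n k' (idx + 1) (PySem.Set.add used r) (acc ++ [r])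

def find_role_assignment_alt (champions_roles : List (List String)) : Option (List String) :=
  let n := champions_roles.length
  if n = 0 then some []
  else pvGreedyB champions_roles n n 0 PySem.Set.empty []

-- ===== PRECONDITION & SPEC =====
def Spec_find_role_assignment (champions_roles : List (List String)) (out : Option (List String)) : Prop := out = find_role_assignment_alt champions_roles
instance (champions_roles : List (List String)) (out : Option (List String)) : Decidable (Spec_find_role_assignment champions_roles out) := by unfold Spec_find_role_assignment; infer_instance

-- ===== CLAIM (what is proved, stated in full; the proofs are below) =====
def Claim_equal_find_role_assignment : Prop := ∀ (champions_roles : List (List String)), Dom_find_role_assignment champions_roles → Spec_find_role_assignment champions_roles (find_role_assignment champions_roles)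

-- ===== LEMMAS AND PROOFS =====

-- one-step unfolding equations for the well-founded definitions
lemma pvBacktrackA_eq (champs : List (List String)) (n rem idx : Nat)
    (used : PySem.Dict String Bool) (assigned : List (Option String)) :
    pvBacktrackA champs n rem idx used assigned
      = if idx = n then (true, used, assigned)
        else match rem with
          | 0 => (false, used, assigned)
          | rem' + 1 =>
            pvTryA (fun u a => pvBacktrackA champs n rem' (idx + 1) u a) idx
              (champs.getD idx []) used assigned := by
  rw [pvBacktrackA.eq_def]

lemma pvTryA_nil (f : PySem.Dict String Bool → List (Option String) →
      Bool × PySem.Dict String Bool × List (Option String)) (idx : Nat)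
    (used : PySem.Dict String Bool) (assigned : List (Option String)) :
    pvTryA f idx [] used assigned = (false, used, assigned) := by
  rw [pvTryA]

lemma pvTryA_cons (f : PySem.Dict String Bool → List (Option String) →
      Bool × PySem.Dict String Bool × List (Option String)) (idx : Nat) (r : String)
    (rest : List String) (used : PySem.Dict String Bool) (assigned : List (Option String)) :
    pvTryA f idx (r :: rest) used assigned
      = if used.contains r && !(used.getD r false) then
          (if (f (used.insert r true) (assigned.set idx (some r))).1
            then f (used.insert r true) (assigned.set idx (some r))
            else pvTryA f idx rest
              ((f (used.insert r true) (assigned.set idx (some r))).2.1.insert r false)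
              ((f (used.insert r true) (assigned.set idx (some r))).2.2.set idx none))
        else pvTryA f idx rest used assigned := by
  rw [pvTryA]

lemma pvFeasibleB_eq (champs : List (List String)) (n rem idx : Nat) (used : PySem.Set String) :
    pvFeasibleB champs n rem idx used
      = if idx = n then true
        else match rem with
          | 0 => false
          | rem' + 1 =>
            pvFeasLoopB (fun u => pvFeasibleB champs n rem' (idx + 1) u) (champs.getD idx []) used := by
  rw [pvFeasibleB.eq_def]

lemma pvFeasLoopB_nil (f : PySem.Set String → Bool) (used : PySem.Set String) :
    pvFeasLoopB f [] used = false := by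
  rw [pvFeasLoopB]

lemma pvFeasLoopB_cons (f : PySem.Set String → Bool) (r : String)
    (rest : List String) (used : PySem.Set String) :
    pvFeasLoopB f (r :: rest) used
      = if pvRoleSetB.contains r && !(used.contains r) && f (PySem.Set.add used r) then true
        else pvFeasLoopB f rest used := by
  rw [pvFeasLoopB]

-- A's used_roles dict over a generic key list: key r ↦ (does the set S hold r)
def pvDictOfL (L : List String) (S : PySem.Set String) : PySem.Dict String Bool :=
  PySem.Dict.mk (L.map (fun r => (r, PySem.Set.contains S r)))

lemma pvDictOfL_get? (L : List String) (S : PySem.Set String) (r : String) :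
    (pvDictOfL L S).get? r = if r ∈ L then some (PySem.Set.contains S r) else none := by
  induction L with
  | nil => simp [pvDictOfL, PySem.Dict.get?]
  | cons x L ih =>
    by_cases hx : x = r
    · subst hx
      simp only [pvDictOfL, List.map_cons, PySem.Dict.get?]
      rw [List.find?_cons_of_pos (by simp)]
      simp
    · have hx' : (x == r) = false := by simpa using hx
      simp only [pvDictOfL, List.map_cons, PySem.Dict.get?]
      rw [List.find?_cons_of_neg (by simp [hx'])]
      have ih' := ih
      simp only [pvDictOfL, PySem.Dict.get?] at ih'
      rw [ih']
      simp [List.mem_cons, Ne.symm hx]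

-- the membership test A performs: 'role in used_roles and not used_roles[role]'
lemma pvDictOfL_guard (L : List String) (S : PySem.Set String) (r : String) :
    ((pvDictOfL L S).contains r && !((pvDictOfL L S).getD r false))
      = (decide (r ∈ L) && !decide (r ∈ S)) := by
  by_cases hL : r ∈ L <;>
    simp [PySem.Dict.contains_eq_isSome_get?, PySem.Dict.getD_eq_get?_getD,
      pvDictOfL_get?, hL, PySem.Set.contains]

lemma pvDictOfL_insert_true (L : List String) (S : PySem.Set String) (r : String)
    (hr : r ∈ L) :
    (pvDictOfL L S).insert r true = pvDictOfL L (PySem.Set.add S r) := by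
  have hc : (pvDictOfL L S).contains r = true := by
    rw [PySem.Dict.contains_eq_isSome_get?, pvDictOfL_get?]; simp [hr]
  unfold PySem.Dict.insert
  rw [hc]
  simp only [pvDictOfL, if_true]
  congr 1
  rw [List.map_map]
  apply List.map_congr_left
  intro ρ _
  by_cases h : ρ = r
  · subst h
    simp [PySem.Set.mem_add]
  · have h' : (ρ == r) = false := by simpa using h
    simp [h', PySem.Set.mem_add, h, Function.comp]

lemma pvDictOfL_insert_false (L : List String) (S : PySem.Set String) (r : String)
    (hr : r ∈ L) (hS : r ∉ S) :
    (pvDictOfL L (PySem.Set.add S r)).insert r false = pvDictOfL L S := by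
  have hc : (pvDictOfL L (PySem.Set.add S r)).contains r = true := by
    rw [PySem.Dict.contains_eq_isSome_get?, pvDictOfL_get?]; simp [hr]
  unfold PySem.Dict.insert
  rw [hc]
  simp only [pvDictOfL, if_true]
  congr 1
  rw [List.map_map]
  apply List.map_congr_left
  intro ρ _
  by_cases h : ρ = r
  · subst h
    simp [hS]
  · have h' : (ρ == r) = false := by simpa using h
    simp [h', PySem.Set.mem_add, h, Function.comp]

lemma pvRoleSetB_eq : pvRoleSetB = pvROLES := by decide

lemma pvSet_eq_self (l : List (Option String)) (i : Nat) (h : l[i]? = some none) :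
    l.set i none = l := by
  induction l generalizing i with
  | nil => simp
  | cons a t ih =>
    cases i with
    | zero => simp_all
    | succ i => simp_all [ih i]

lemma pvTakeSet (l : List String) (i : Nat) (x : String) (h : i < l.length) :
    (l.set i x).take (i + 1) = l.take i ++ [x] := by
  induction l generalizing i with
  | nil => simp at h
  | cons a t ih =>
    cases i with
    | zero => simp
    | succ i =>
      have h' : i < t.length := by simpa using h
      simp [ih i h']

-- the main invariant, inner loop: running A's role loop at champion idx from used = dict of S
-- computes B's feasibility loop, restores its state on failure, and on success returns exactly
-- B's pick together with B's greedy completion of the rest.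
lemma pvQ (champs : List (List String)) (n : Nat) (rem' : Nat)
    (hP : ∀ (idx : Nat) (S : PySem.Set String) (assigned : List (Option String)) (acc : List String),
      idx ≤ n → rem' = n - idx → assigned.length = n →
      (∀ j, idx ≤ j → j < n → assigned[j]? = some none) →
      (pvBacktrackA champs n rem' idx (pvDictOfL pvROLES S) assigned).1
          = pvFeasibleB champs n rem' idx S ∧
      ((pvBacktrackA champs n rem' idx (pvDictOfL pvROLES S) assigned).1 = false →
        pvBacktrackA champs n rem' idx (pvDictOfL pvROLES S) assigned
            = (false, pvDictOfL pvROLES S, assigned) ∧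
        pvGreedyB champs n rem' idx S acc = none) ∧
      ((pvBacktrackA champs n rem' idx (pvDictOfL pvROLES S) assigned).1 = true →
        ∃ suffix, suffix.length = rem' ∧
          pvGreedyB champs n rem' idx S acc = some (acc ++ suffix) ∧
          (pvBacktrackA champs n rem' idx (pvDictOfL pvROLES S) assigned).2.2.map (fun o => o.getD "")
              = (assigned.map (fun o => o.getD "")).take idx ++ suffix)) :
    ∀ (roles : List String) (idx : Nat) (S : PySem.Set String) (assigned : List (Option String)) (acc : List String),
      idx + 1 ≤ n → rem' = n - (idx + 1) → assigned.length = n →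
      (∀ j, idx ≤ j → j < n → assigned[j]? = some none) →
      (pvTryA (fun u a => pvBacktrackA champs n rem' (idx + 1) u a) idx roles (pvDictOfL pvROLES S) assigned).1
          = pvFeasLoopB (fun u => pvFeasibleB champs n rem' (idx + 1) u) roles S ∧
      ((pvTryA (fun u a => pvBacktrackA champs n rem' (idx + 1) u a) idx roles (pvDictOfL pvROLES S) assigned).1 = false →
        pvTryA (fun u a => pvBacktrackA champs n rem' (idx + 1) u a) idx roles (pvDictOfL pvROLES S) assigned
            = (false, pvDictOfL pvROLES S, assigned) ∧
        pvPickB champs n idx roles S = none) ∧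
      ((pvTryA (fun u a => pvBacktrackA champs n rem' (idx + 1) u a) idx roles (pvDictOfL pvROLES S) assigned).1 = true →
        ∃ r suffix, pvPickB champs n idx roles S = some r ∧ suffix.length = rem' ∧
          pvGreedyB champs n rem' (idx + 1) (PySem.Set.add S r) (acc ++ [r])
              = some ((acc ++ [r]) ++ suffix) ∧
          (pvTryA (fun u a => pvBacktrackA champs n rem' (idx + 1) u a) idx roles (pvDictOfL pvROLES S) assigned).2.2.map (fun o => o.getD "")
              = ((assigned.set idx (some r)).map (fun o => o.getD "")).take (idx + 1) ++ suffix) := by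
  intro roles
  induction roles with
  | nil =>
    intro idx S assigned acc h1 h2 h3 h4
    simp [pvTryA_nil, pvFeasLoopB_nil, pvPickB]
  | cons r rest ih =>
    intro idx S assigned acc h1 h2 h3 h4
    by_cases hg : r ∈ pvROLES ∧ r ∉ S
    · obtain ⟨hr, hS⟩ := hg
      have hcb : ((pvDictOfL pvROLES S).contains r && !((pvDictOfL pvROLES S).getD r false)) = true := by
        rw [pvDictOfL_guard]; simp [hr, hS]
      have h3' : (assigned.set idx (some r)).length = n := by simp [h3]
      have h4' : ∀ j, idx + 1 ≤ j → j < n → (assigned.set idx (some r))[j]? = some none := by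
        intro j hj1 hj2
        rw [List.getElem?_set_ne (by omega)]
        exact h4 j (by omega) hj2
      obtain ⟨hb1, hfail1, hsucc1⟩ :=
        hP (idx + 1) (PySem.Set.add S r) (assigned.set idx (some r)) (acc ++ [r]) h1 h2 h3' h4'
      by_cases hres : (pvBacktrackA champs n rem' (idx + 1) (pvDictOfL pvROLES (PySem.Set.add S r)) (assigned.set idx (some r))).1 = true
      · -- A commits role r here and succeeds
        have hT : pvTryA (fun u a => pvBacktrackA champs n rem' (idx + 1) u a) idx (r :: rest) (pvDictOfL pvROLES S) assigned
            = pvBacktrackA champs n rem' (idx + 1) (pvDictOfL pvROLES (PySem.Set.add S r)) (assigned.set idx (some r)) := by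
          rw [pvTryA_cons]
          beta_reduce
          rw [if_pos hcb, pvDictOfL_insert_true pvROLES S r hr, if_pos hres]
        have hfeas : pvFeasibleB champs n rem' (idx + 1) (PySem.Set.add S r) = true := by
          rw [← hb1]; exact hres
        have hL : pvFeasLoopB (fun u => pvFeasibleB champs n rem' (idx + 1) u) (r :: rest) S = true := by
          rw [pvFeasLoopB_cons]
          beta_reduce
          rw [hfeas]
          simp [pvRoleSetB_eq, PySem.Set.contains, hr, hS]
        have hpick : pvPickB champs n idx (r :: rest) S = some r := by
          simp only [pvPickB]
          rw [← h2, hfeas]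
          simp [pvRoleSetB_eq, PySem.Set.contains, hr, hS]
        refine ⟨by rw [hT, hL, hres], ?_, ?_⟩
        · intro hff
          rw [hT, hres] at hff
          simp at hff
        · intro _
          obtain ⟨suffix, hlen, hgr, hmap⟩ := hsucc1 hres
          exact ⟨r, suffix, hpick, hlen, hgr, by rw [hT]; exact hmap⟩
      · -- A tries r, fails below, restores the state and moves on
        have hres' : (pvBacktrackA champs n rem' (idx + 1) (pvDictOfL pvROLES (PySem.Set.add S r)) (assigned.set idx (some r))).1 = false := by
          simpa using hres
        obtain ⟨hrest_eq, _⟩ := hfail1 hres'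
        have hfeas : pvFeasibleB champs n rem' (idx + 1) (PySem.Set.add S r) = false := by
          rw [← hb1]; exact hres'
        have hT : pvTryA (fun u a => pvBacktrackA champs n rem' (idx + 1) u a) idx (r :: rest) (pvDictOfL pvROLES S) assigned
            = pvTryA (fun u a => pvBacktrackA champs n rem' (idx + 1) u a) idx rest (pvDictOfL pvROLES S) assigned := by
          have hne : ¬ ((false, pvDictOfL pvROLES (PySem.Set.add S r), assigned.set idx (some r)) :
              Bool × PySem.Dict String Bool × List (Option String)).1 = true := by simp
          rw [pvTryA_cons, if_pos hcb, pvDictOfL_insert_true pvROLES S r hr, hrest_eq, if_neg hne]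
          show pvTryA (fun u a => pvBacktrackA champs n rem' (idx + 1) u a) idx rest ((pvDictOfL pvROLES (PySem.Set.add S r)).insert r false)
              ((assigned.set idx (some r)).set idx none) = _
          rw [pvDictOfL_insert_false pvROLES S r hr hS, List.set_set,
            pvSet_eq_self assigned idx (h4 idx (Nat.le_refl idx) (by omega))]
        have hL : pvFeasLoopB (fun u => pvFeasibleB champs n rem' (idx + 1) u) (r :: rest) S = pvFeasLoopB (fun u => pvFeasibleB champs n rem' (idx + 1) u) rest S := by
          rw [pvFeasLoopB_cons]
          beta_reduce
          rw [hfeas]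
          simp
        have hpk : pvPickB champs n idx (r :: rest) S = pvPickB champs n idx rest S := by
          simp only [pvPickB]
          rw [← h2, hfeas]
          simp
        rw [hT, hL, hpk]
        exact ih idx S assigned acc h1 h2 h3 h4
    · -- role r is not assignable at all (invalid or already used): both sides skip it
      have hcb : ((pvDictOfL pvROLES S).contains r && !((pvDictOfL pvROLES S).getD r false)) = false := by
        rw [pvDictOfL_guard]
        by_cases h1' : r ∈ pvROLES <;> by_cases h2' : r ∈ S <;>
          simp [h1', h2'] <;> exact absurd ⟨h1', h2'⟩ hg
      have hBB : (pvRoleSetB.contains r = false) ∨ ((!(S.contains r)) = false) := by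
        by_cases h1' : r ∈ pvROLES
        · have h2' : r ∈ S := by
            by_contra hc; exact hg ⟨h1', hc⟩
          right; simp [PySem.Set.contains, h2']
        · left; simp [pvRoleSetB_eq, PySem.Set.contains, h1']
      have hT : pvTryA (fun u a => pvBacktrackA champs n rem' (idx + 1) u a) idx (r :: rest) (pvDictOfL pvROLES S) assigned
          = pvTryA (fun u a => pvBacktrackA champs n rem' (idx + 1) u a) idx rest (pvDictOfL pvROLES S) assigned := by
        rw [pvTryA_cons, if_neg (by simp [hcb])]
      have hL : pvFeasLoopB (fun u => pvFeasibleB champs n rem' (idx + 1) u) (r :: rest) S = pvFeasLoopB (fun u => pvFeasibleB champs n rem' (idx + 1) u) rest S := by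
        rcases hBB with h | h <;> (rw [pvFeasLoopB_cons, h]; simp)
      have hpk : pvPickB champs n idx (r :: rest) S = pvPickB champs n idx rest S := by
        rcases hBB with h | h <;> (simp only [pvPickB]; rw [h]; simp)
      rw [hT, hL, hpk]
      exact ih idx S assigned acc h1 h2 h3 h4

lemma pvP (champs : List (List String)) (n : Nat) : ∀ (rem : Nat)
    (idx : Nat) (S : PySem.Set String) (assigned : List (Option String)) (acc : List String),
    idx ≤ n → rem = n - idx → assigned.length = n →
    (∀ j, idx ≤ j → j < n → assigned[j]? = some none) →
    (pvBacktrackA champs n rem idx (pvDictOfL pvROLES S) assigned).1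
        = pvFeasibleB champs n rem idx S ∧
    ((pvBacktrackA champs n rem idx (pvDictOfL pvROLES S) assigned).1 = false →
      pvBacktrackA champs n rem idx (pvDictOfL pvROLES S) assigned
          = (false, pvDictOfL pvROLES S, assigned) ∧
      pvGreedyB champs n rem idx S acc = none) ∧
    ((pvBacktrackA champs n rem idx (pvDictOfL pvROLES S) assigned).1 = true →
      ∃ suffix, suffix.length = rem ∧
        pvGreedyB champs n rem idx S acc = some (acc ++ suffix) ∧
        (pvBacktrackA champs n rem idx (pvDictOfL pvROLES S) assigned).2.2.map (fun o => o.getD "")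
            = (assigned.map (fun o => o.getD "")).take idx ++ suffix) := by
  intro rem
  induction rem with
  | zero =>
    intro idx S assigned acc h1 h2 h3 h4
    have hidx : idx = n := by omega
    have hA : pvBacktrackA champs n 0 idx (pvDictOfL pvROLES S) assigned
        = (true, pvDictOfL pvROLES S, assigned) := by
      rw [pvBacktrackA_eq]; simp [hidx]
    have hF : pvFeasibleB champs n 0 idx S = true := by
      rw [pvFeasibleB_eq]; simp [hidx]
    refine ⟨by rw [hA, hF], by intro hc; rw [hA] at hc; simp at hc, ?_⟩
    intro _
    refine ⟨[], rfl, by simp [pvGreedyB], ?_⟩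
    rw [hA]
    have hlen : (List.map (fun o => o.getD "") assigned).length = n := by simp [h3]
    rw [hidx, ← hlen, List.take_length]
    simp
  | succ rem'' ih =>
    intro idx S assigned acc h1 h2 h3 h4
    have hidxlt : idx < n := by omega
    have hA : pvBacktrackA champs n (rem'' + 1) idx (pvDictOfL pvROLES S) assigned
        = pvTryA (fun u a => pvBacktrackA champs n rem'' (idx + 1) u a) idx (champs.getD idx []) (pvDictOfL pvROLES S) assigned := by
      rw [pvBacktrackA_eq]; simp [Nat.ne_of_lt hidxlt]
    have hF : pvFeasibleB champs n (rem'' + 1) idx S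
        = pvFeasLoopB (fun u => pvFeasibleB champs n rem'' (idx + 1) u) (champs.getD idx []) S := by
      rw [pvFeasibleB_eq]; simp [Nat.ne_of_lt hidxlt]
    obtain ⟨hb, hfail, hsucc⟩ :=
      pvQ champs n rem'' ih (champs.getD idx []) idx S assigned acc (by omega) (by omega) h3 h4
    refine ⟨by rw [hA, hF, hb], ?_, ?_⟩
    · intro hff
      rw [hA] at hff ⊢
      obtain ⟨hTeq, hpick⟩ := hfail hff
      exact ⟨hTeq, by simp only [pvGreedyB, hpick]⟩
    · intro htt
      rw [hA] at htt
      obtain ⟨r, suffix, hpick, hlen, hgr, hmap⟩ := hsucc htt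
      refine ⟨r :: suffix, by simp [hlen], ?_, ?_⟩
      · simp only [pvGreedyB, hpick, hgr]
        simp
      · rw [hA, hmap, List.map_set, pvTakeSet _ idx _ (by simp [h3]; omega)]
        simp

-- ===== VERDICT (by name: the statement is the Claim_ definition above) =====
theorem find_role_assignment_spec : Claim_equal_find_role_assignment := by
  intro champs _
  unfold Spec_find_role_assignment
  by_cases hn : champs.length = 0
  · simp [find_role_assignment, find_role_assignment_alt, hn]
  · have hd : pvROLES.foldl (fun d r => d.insert r false) PySem.Dict.empty
        = pvDictOfL pvROLES PySem.Set.empty := by decide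
    obtain ⟨hb, hfail, hsucc⟩ := pvP champs champs.length champs.length 0 PySem.Set.empty
      (List.replicate champs.length none) [] (by omega) (by omega) (by simp)
      (by intro j _ hj; simp [hj])
    simp only [find_role_assignment, find_role_assignment_alt, hn, if_neg hn, hd]
    by_cases hres : (pvBacktrackA champs champs.length champs.length 0
        (pvDictOfL pvROLES PySem.Set.empty) (List.replicate champs.length none)).1 = true
    · obtain ⟨suffix, _hlen, hgr, hmap⟩ := hsucc hres
      rw [if_pos hres, hmap, hgr]
      simp
    · have hres' : (pvBacktrackA champs champs.length champs.length 0
          (pvDictOfL pvROLES PySem.Set.empty) (List.replicate champs.length none)).1 = false := by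
        simpa using hres
      obtain ⟨_, hgr⟩ := hfail hres'
      rw [if_neg hres, hgr]
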